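-- pv_equiv track=rewrite | github.com/mdrafiqulrabin/kconfig | legacy/differential_testing/sabine_csmith/scripts/v5/gcov/gcov_coverage.py | getLineCoverage
-- ===== SOURCE A (Python) =====
-- def getLineCoverage(gcov_f, gcov_s):
--     csv_line = ""
--     cnt_t = 0; cnt_y = 0; cnt_n = 0; cnt_x = 0
--     for gs in gcov_s:
--         line_covered_binary = ""
--         gs_value = gs[0].strip()
--         gs_line  = gs[1].strip()
--         if int(gs_line) <= 0: continue
--         cnt_t += 1
--         try:
--             if int(gs_value)>0:
--                 line_covered_binary = "1"
--                 cnt_y += 1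
--             else:
--                 line_covered_binary = "0"
--                 cnt_n += 1
--         except ValueError:
--             if gs_value == "#####":
--                 line_covered_binary = "0"
--                 cnt_n += 1
--             else:
--                 line_covered_binary = "-1"
--                 cnt_x += 1
--
--         if len(csv_line)>0:
--             csv_line += "," + line_covered_binary
--         else:
--             csv_line += line_covered_binary
--     csv_line = gcov_f + "," + str(cnt_t) + "," + str(cnt_y) + "," + str(cnt_n) + "," + str(cnt_x) + "," + csv_line
--     return csv_line
-- ===== SOURCE B (Python) =====
-- def getLineCoverage(gcov_f, gcov_s):
--     def classify(gs):
--         gs_value = gs[0].strip()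
--         if int(gs[1].strip()) <= 0:
--             return None
--         try:
--             return "1" if int(gs_value) > 0 else "0"
--         except ValueError:
--             return "0" if gs_value == "#####" else "-1"
--
--     def solve(lo, hi):
--         # (codes, total, yes, no, unknown) for gcov_s[lo:hi], by halving
--         if hi - lo == 0:
--             return ([], 0, 0, 0, 0)
--         if hi - lo == 1:
--             c = classify(gcov_s[lo])
--             if c is None:
--                 return ([], 0, 0, 0, 0)
--             return ([c], 1, int(c == "1"), int(c == "0"), int(c == "-1"))
--         mid = (lo + hi) // 2
--         lc, lt, ly, ln, lx = solve(lo, mid)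
--         rc, rt, ry, rn, rx = solve(mid, hi)
--         return (lc + rc, lt + rt, ly + ry, ln + rn, lx + rx)
--
--     codes, t, y, n, x = solve(0, len(gcov_s))
--     return ",".join([gcov_f, str(t), str(y), str(n), str(x), ",".join(codes)])
-- ===== Notes on version B (the rewrite author's own statement) =====
-- stated objective: alternative
-- what changed: B replaces A's single left-to-right fold with five inline accumulators and manual comma handling by a divide-and-conquer recursion that splits the row list in half, classifies each half independently, merges (codes, counts) tuples by concatenation/addition, and joins everything at the end; correct because classification is per-row and the merge is associative.
import Mathlib
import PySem

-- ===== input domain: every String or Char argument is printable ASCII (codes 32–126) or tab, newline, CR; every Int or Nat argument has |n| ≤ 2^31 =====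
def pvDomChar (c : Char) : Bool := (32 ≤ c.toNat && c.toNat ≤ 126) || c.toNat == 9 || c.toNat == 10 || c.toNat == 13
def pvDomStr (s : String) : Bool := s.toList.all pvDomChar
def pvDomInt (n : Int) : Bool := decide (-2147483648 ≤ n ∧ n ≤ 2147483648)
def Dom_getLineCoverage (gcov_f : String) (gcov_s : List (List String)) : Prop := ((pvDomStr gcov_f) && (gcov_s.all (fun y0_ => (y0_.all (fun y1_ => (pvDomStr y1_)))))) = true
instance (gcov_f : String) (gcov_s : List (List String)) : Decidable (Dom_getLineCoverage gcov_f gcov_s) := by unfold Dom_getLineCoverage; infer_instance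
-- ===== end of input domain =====

-- B replaces A's left fold with inline accumulators by a divide-and-conquer recursion merging (codes, counts) pairs; return values proved equal on Pre_.

-- ===== PORT A =====
-- one loop iteration of A: state = (csv_line, cnt_t, cnt_y, cnt_n, cnt_x)
def stepA (st : String × Int × Int × Int × Int) (gs : List String) : String × Int × Int × Int × Int :=
  let gs_value := PySem.Str.strip (PySem.List.pyGetD gs 0 "")
  let gs_line  := PySem.Str.strip (PySem.List.pyGetD gs 1 "")
  match PySem.Int.ofStr? gs_line with
  | none => st            -- int(gs_line) raises ValueError: outside Pre_
  | some lv =>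
    if lv ≤ 0 then st
    else
      let (csv, t, y, n, x) := st
      let (c, y', n', x') :=
        match PySem.Int.ofStr? gs_value with
        | some v => if v > 0 then ("1", y + 1, n, x) else ("0", y, n + 1, x)
        | none   => if gs_value = "#####" then ("0", y, n + 1, x) else ("-1", y, n, x + 1)
      let csv' := if PySem.Str.len csv > 0 then csv ++ "," ++ c else csv ++ c
      (csv', t + 1, y', n', x')

def getLineCoverage (gcov_f : String) (gcov_s : List (List String)) : String :=
  let st := gcov_s.foldl stepA ("", 0, 0, 0, 0)
  gcov_f ++ "," ++ PySem.Int.toStr st.2.1 ++ "," ++ PySem.Int.toStr st.2.2.1 ++ ","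
    ++ PySem.Int.toStr st.2.2.2.1 ++ "," ++ PySem.Int.toStr st.2.2.2.2 ++ "," ++ st.1

-- ===== PORT B =====
-- B's classify: the code for row gs, or none on 'continue' (none also on the ValueError of int(gs[1].strip()), outside Pre_)
def classifyB (gs : List String) : Option String :=
  let gs_value := PySem.Str.strip (PySem.List.pyGetD gs 0 "")
  match PySem.Int.ofStr? (PySem.Str.strip (PySem.List.pyGetD gs 1 "")) with
  | none => none
  | some lv =>
    if lv ≤ 0 then none
    else
      some (match PySem.Int.ofStr? gs_value with
            | some v => if v > 0 then "1" else "0"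
            | none   => if gs_value = "#####" then "0" else "-1")

-- B's divide-and-conquer 'solve' over the sublist rows = gcov_s[lo:hi] (the slice indices of Source B
-- become the list being recursed on; splitting at len/2 is rows.take/drop (len/2), exact)
def solveB (rows : List (List String)) : List String × Int × Int × Int × Int :=
  match h : rows with
  | [] => ([], 0, 0, 0, 0)
  | [gs] =>
    match classifyB gs with
    | none => ([], 0, 0, 0, 0)
    | some c => ([c], 1, if c = "1" then 1 else 0, if c = "0" then 1 else 0, if c = "-1" then 1 else 0)
  | g1 :: g2 :: rest =>
    let mid := rows.length / 2
    let (lc, lt, ly, ln, lx) := solveB (rows.take mid)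
    let (rc, rt, ry, rn, rx) := solveB (rows.drop mid)
    (lc ++ rc, lt + rt, ly + ry, ln + rn, lx + rx)
termination_by rows.length
decreasing_by
  · simp_all; omega
  · simp_all; omega

def getLineCoverage_alt (gcov_f : String) (gcov_s : List (List String)) : String :=
  let (codes, t, y, n, x) := solveB gcov_s
  PySem.Str.join ","
    [gcov_f, PySem.Int.toStr t, PySem.Int.toStr y, PySem.Int.toStr n, PySem.Int.toStr x,
     PySem.Str.join "," codes]

-- ===== PRECONDITION & SPEC =====
-- Pre_ excludes exactly the inputs where A raises: a row shorter than 2 (IndexError) or a second field that is not an int literal (uncaught ValueError).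
def Pre_getLineCoverage (gcov_f : String) (gcov_s : List (List String)) : Prop :=
  ∀ gs ∈ gcov_s, 2 ≤ gs.length ∧ (PySem.Int.ofStr? (PySem.Str.strip (PySem.List.pyGetD gs 1 ""))).isSome = true
instance (gcov_f : String) (gcov_s : List (List String)) : Decidable (Pre_getLineCoverage gcov_f gcov_s) := by unfold Pre_getLineCoverage; infer_instance

def pvWitness_getLineCoverage : String × List (List String) :=
  ("t.c.gcov", [["3", "1"], ["#####", "2"], ["-", "3"], ["0", "4"], ["7", "0"]])

def Spec_getLineCoverage (gcov_f : String) (gcov_s : List (List String)) (out : String) : Prop := out = getLineCoverage_alt gcov_f gcov_s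
instance (gcov_f : String) (gcov_s : List (List String)) (out : String) : Decidable (Spec_getLineCoverage gcov_f gcov_s out) := by unfold Spec_getLineCoverage; infer_instance

-- ===== CLAIM (what is proved, stated in full; the proofs are below) =====
def Claim_equal_getLineCoverage : Prop := ∀ (gcov_f : String) (gcov_s : List (List String)), Dom_getLineCoverage gcov_f gcov_s → Pre_getLineCoverage gcov_f gcov_s → Spec_getLineCoverage gcov_f gcov_s (getLineCoverage gcov_f gcov_s)

-- ===== LEMMAS AND PROOFS =====

-- proof-side helper: the snoc-fold that A's comma loop simulates
def stepB (acc : List String) (gs : List String) : List String :=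
  match classifyB gs with
  | some c => acc ++ [c]
  | none => acc

-- join with "," of a snoc, at the char level
theorem chars_join_snoc (x a : List Char) (xs : List (List Char)) :
    PySem.Chars.join [','] ((a :: xs) ++ [x]) = PySem.Chars.join [','] (a :: xs) ++ [','] ++ x := by
  induction xs generalizing a with
  | nil => simp [PySem.Chars.join_cons_cons, PySem.Chars.join_singleton]
  | cons b t ih =>
      have h := ih b
      simp only [List.cons_append] at h ⊢
      rw [PySem.Chars.join_cons_cons, PySem.Chars.join_cons_cons, h]
      simp [List.append_assoc]

theorem chars_join_ne_nil (a : List Char) (xs : List (List Char)) (ha : a ≠ []) :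
    PySem.Chars.join [','] (a :: xs) ≠ [] := by
  cases xs with
  | nil => simpa [PySem.Chars.join_singleton] using ha
  | cons b t =>
      rw [PySem.Chars.join_cons_cons]
      simp [ha]

-- the three code strings are nonempty
theorem code_ne_nil (c : String) (h : c = "1" ∨ c = "0" ∨ c = "-1") : c.toList ≠ [] := by
  rcases h with h | h | h <;> subst h <;> decide

-- A's comma handling equals join of the snoc, when every earlier code is one of "1"/"0"/"-1"
theorem join_snoc' (codes : List String) (c : String)
    (h : ∀ s ∈ codes, s = "1" ∨ s = "0" ∨ s = "-1") :
    (if 0 < (PySem.Chars.join [','] (codes.map String.toList)).length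
     then PySem.Str.join "," codes ++ "," ++ c
     else PySem.Str.join "," codes ++ c) = PySem.Str.join "," (codes ++ [c]) := by
  cases codes with
  | nil =>
      rw [if_neg (by simp [PySem.Chars.join_nil])]
      apply String.toList_injective
      simp [PySem.Str.toList_join, PySem.Chars.join_nil, PySem.Chars.join_singleton]
  | cons a rest =>
      have hane : a.toList ≠ [] := code_ne_nil a (h a (by simp))
      have hne : PySem.Chars.join [','] ((a :: rest).map String.toList) ≠ [] := by
        simpa using chars_join_ne_nil a.toList (rest.map String.toList) hane
      rw [if_pos (by simpa using List.length_pos_iff.mpr hne)]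
      apply String.toList_injective
      simp only [String.toList_append, PySem.Str.toList_join, List.map_append, List.map_cons,
        List.map_nil]
      have := chars_join_snoc c.toList a.toList (rest.map String.toList)
      simpa using this.symm

-- the per-element correspondence between A's step and the snoc-fold
theorem step_corr (gs codes : List String)
    (h : ∀ s ∈ codes, s = "1" ∨ s = "0" ∨ s = "-1") :
    stepA (PySem.Str.join "," codes, (codes.length : Int),
           (PySem.List.count codes "1" : Int), (PySem.List.count codes "0" : Int),
           (PySem.List.count codes "-1" : Int)) gs
    = (PySem.Str.join "," (stepB codes gs), ((stepB codes gs).length : Int),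
       (PySem.List.count (stepB codes gs) "1" : Int), (PySem.List.count (stepB codes gs) "0" : Int),
       (PySem.List.count (stepB codes gs) "-1" : Int)) := by
  unfold stepA stepB classifyB
  cases hl : PySem.Int.ofStr? (PySem.Str.strip (PySem.List.pyGetD gs 1 "")) with
  | none => simp [hl]
  | some lv =>
      simp only [hl]
      by_cases hlv : lv ≤ 0
      · simp [hlv]
      · simp only [hlv, if_false]
        cases hv : PySem.Int.ofStr? (PySem.Str.strip (PySem.List.pyGetD gs 0 "")) with
        | some v =>
            by_cases hvp : v > 0
            · simp [hvp, join_snoc' codes "1" h]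
            · simp [hvp, join_snoc' codes "0" h]
        | none =>
            by_cases hsh : PySem.Str.strip (PySem.List.pyGetD gs 0 "") = "#####"
            · simp [hsh, join_snoc' codes "0" h]
            · simp [hsh, join_snoc' codes "-1" h]

theorem classifyB_mem (gs : List String) (c : String) (h : classifyB gs = some c) :
    c = "1" ∨ c = "0" ∨ c = "-1" := by
  unfold classifyB at h
  cases hl : PySem.Int.ofStr? (PySem.Str.strip (PySem.List.pyGetD gs 1 "")) with
  | none => rw [hl] at h; cases h
  | some lv =>
      rw [hl] at h
      by_cases hlv : lv ≤ 0
      · simp [hlv] at h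
      · simp only [hlv, if_false, Option.some.injEq] at h
        cases hv : PySem.Int.ofStr? (PySem.Str.strip (PySem.List.pyGetD gs 0 "")) with
        | some v => simp only [hv] at h; split_ifs at h <;> simp [← h]
        | none => simp only [hv] at h; split_ifs at h <;> simp [← h]

theorem stepB_codes (gs codes : List String)
    (h : ∀ s ∈ codes, s = "1" ∨ s = "0" ∨ s = "-1") :
    ∀ s ∈ stepB codes gs, s = "1" ∨ s = "0" ∨ s = "-1" := by
  unfold stepB
  cases hc : classifyB gs with
  | none => simpa using h
  | some c =>
      intro s hs
      rcases List.mem_append.mp hs with hs | hs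
      · exact h s hs
      · simp only [List.mem_singleton] at hs
        subst hs
        exact classifyB_mem gs s hc

-- the loop invariant: A's fold state is determined by the snoc-fold's codes list
theorem loop_inv (l : List (List String)) :
    ∀ codes : List String, (∀ s ∈ codes, s = "1" ∨ s = "0" ∨ s = "-1") →
    l.foldl stepA (PySem.Str.join "," codes, (codes.length : Int),
      (PySem.List.count codes "1" : Int), (PySem.List.count codes "0" : Int),
      (PySem.List.count codes "-1" : Int))
    = (PySem.Str.join "," (l.foldl stepB codes), ((l.foldl stepB codes).length : Int),
       (PySem.List.count (l.foldl stepB codes) "1" : Int),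
       (PySem.List.count (l.foldl stepB codes) "0" : Int),
       (PySem.List.count (l.foldl stepB codes) "-1" : Int)) := by
  induction l with
  | nil => intro codes h; simp
  | cons gs t ih =>
      intro codes h
      simp only [List.foldl_cons]
      rw [step_corr gs codes h]
      exact ih (stepB codes gs) (stepB_codes gs codes h)

-- the snoc-fold computes filterMap classifyB
theorem foldl_stepB (l : List (List String)) (codes : List String) :
    l.foldl stepB codes = codes ++ l.filterMap classifyB := by
  induction l generalizing codes with
  | nil => simp
  | cons gs t ih =>
      simp only [List.foldl_cons, List.filterMap_cons, stepB]
      cases classifyB gs <;> simp [ih]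

-- B's divide-and-conquer computes (filterMap classifyB, its length and counts)
theorem solveB_eq (rows : List (List String)) :
    solveB rows = (rows.filterMap classifyB, ((rows.filterMap classifyB).length : Int),
      (PySem.List.count (rows.filterMap classifyB) "1" : Int),
      (PySem.List.count (rows.filterMap classifyB) "0" : Int),
      (PySem.List.count (rows.filterMap classifyB) "-1" : Int)) := by
  match rows with
  | [] => simp [solveB]
  | [gs] =>
      cases hc : classifyB gs with
      | none => simp [solveB, hc]
      | some c =>
          simp only [solveB, hc, List.filterMap_cons, List.filterMap_nil]
          simp only [PySem.List.count_eq, List.count_cons, List.count_nil,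
            List.length_cons, List.length_nil]
          by_cases h1 : c = "1" <;> by_cases h0 : c = "0" <;> by_cases hm : c = "-1" <;>
            simp_all
  | g1 :: g2 :: rest =>
      have ihl := solveB_eq ((g1 :: g2 :: rest).take ((g1 :: g2 :: rest).length / 2))
      have ihr := solveB_eq ((g1 :: g2 :: rest).drop ((g1 :: g2 :: rest).length / 2))
      rw [solveB]
      simp only [ihl, ihr]
      have hsplit : (g1 :: g2 :: rest).take ((g1 :: g2 :: rest).length / 2)
          ++ (g1 :: g2 :: rest).drop ((g1 :: g2 :: rest).length / 2) = g1 :: g2 :: rest :=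
        List.take_append_drop _ _
      conv_rhs => rw [← hsplit]
      simp only [List.filterMap_append, PySem.List.count_eq, List.count_append,
        List.length_append, Nat.cast_add]
termination_by rows.length
decreasing_by
  · simp; omega
  · simp; omega

-- join of the six final fields is the manual concatenation
theorem join_six (a b c d e f : String) :
    PySem.Str.join "," [a, b, c, d, e, f]
      = a ++ "," ++ b ++ "," ++ c ++ "," ++ d ++ "," ++ e ++ "," ++ f := by
  apply String.toList_injective
  simp [PySem.Str.toList_join, PySem.Chars.join, List.intercalate]

-- ===== VERDICT (by name: the statement is the Claim_ definition above) =====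
theorem getLineCoverage_spec : Claim_equal_getLineCoverage := by
  intro gcov_f gcov_s _ _
  unfold Spec_getLineCoverage getLineCoverage getLineCoverage_alt
  have h0 : PySem.Str.join "," ([] : List String) = "" := by
    apply String.toList_injective
    simp [PySem.Str.toList_join, PySem.Chars.join_nil]
  have hinv := loop_inv gcov_s [] (by simp)
  rw [foldl_stepB gcov_s []] at hinv
  simp only [List.count_nil, PySem.List.count_eq, List.length_nil, Nat.cast_zero,
    List.nil_append, h0] at hinv
  rw [solveB_eq]
  simp only [hinv, join_six]
  simp [PySem.List.count_eq]
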